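-- pv_equiv track=rewrite | github.com/AlyonaKlekovkina/JetBrainsAcademy-Cracking_The_Caesar_Cipher | solution.py | get_shitf
-- ===== SOURCE A (Python) =====
-- def get_shitf(sw_index, inp_index):
--     secret_word_to_check = []
--     count = 0
--     while count < 26:
--         for i in sw_index:
--             if i + count < 26:
--                 index = i + count
--             else:
--                 index = (i + count) - 26
--             secret_word_to_check.append(index)
--         for i in range(len(inp_index)):
--             start = 0
--             end = len(sw_index)
--             if secret_word_to_check == inp_index[start + i:end + i]:
--                 return count
--         count += 1
--         secret_word_to_check.clear()
-- ===== SOURCE B (Python) =====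
-- def _shift(s, c):
--     t = s + c
--     return t - 26 if t >= 26 else t
--
--
-- def get_shitf(sw_index, inp_index):
--     n = len(sw_index)
--     m = len(inp_index)
--     hits = []
--     for i in range(m - n + 1):
--         if n == 0:
--             cands = [0]
--         else:
--             d = inp_index[i] - sw_index[0]
--             cands = [c for c in (d, d + 26) if 0 <= c < 26]
--         for c in cands:
--             if all(inp_index[i + j] == _shift(sw_index[j], c) for j in range(n)):
--                 hits.append(c)
--     return min(hits) if hits else None
-- ===== Notes on version B (the rewrite author's own statement) =====
-- stated objective: alternative
-- what changed: Instead of trying all 26 shifts and re-slicing the text for each (A), B scans each start position once, derives the at-most-two feasible shifts from the first pattern element, verifies them in place, and returns the minimum verified shift.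
-- intended difference: On the single input where both lists are empty A returns None (its position loop ranges over the empty text), while B returns 0: the empty pattern occurs in the empty text at shift 0, so 0 is the intended answer. — e.g. on get_shitf([], []): A returns none, B returns some 0
import Mathlib
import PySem

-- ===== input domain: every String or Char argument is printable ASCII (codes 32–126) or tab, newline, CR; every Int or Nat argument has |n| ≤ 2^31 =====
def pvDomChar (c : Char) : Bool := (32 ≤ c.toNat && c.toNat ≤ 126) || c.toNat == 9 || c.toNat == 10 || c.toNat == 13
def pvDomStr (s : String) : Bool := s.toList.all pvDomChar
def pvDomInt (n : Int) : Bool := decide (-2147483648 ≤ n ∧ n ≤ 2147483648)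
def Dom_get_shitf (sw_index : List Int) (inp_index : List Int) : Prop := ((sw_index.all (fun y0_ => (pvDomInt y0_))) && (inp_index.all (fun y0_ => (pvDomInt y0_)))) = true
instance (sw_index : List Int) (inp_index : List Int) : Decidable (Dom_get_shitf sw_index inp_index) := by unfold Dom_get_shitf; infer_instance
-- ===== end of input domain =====

-- B replaces A's 26-shift brute force by deriving at most two feasible shifts per start
-- position from the first pattern element and taking the minimum verified one (objective: alternative).

-- ===== PORT A =====
-- the per-letter shift rule of A's first inner for-loop
def pvShiftA (i count : Int) : Int := if i + count < 26 then i + count else (i + count) - 26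

-- A's second inner for-loop: scan start positions, compare against the slice
def pvScanA (swc inp : List Int) (endI : Int) : List Int → Bool
  | [] => false
  | i :: rest =>
    if swc = PySem.List.slice inp (some (0 + i)) (some (endI + i)) then true
    else pvScanA swc inp endI rest

-- A's 'while count < 26' with 'count += 1' = recursion over the remaining counts
def pvLoopA (sw inp : List Int) : List Int → Option Int
  | [] => none
  | count :: rest =>
    let swc := sw.foldl (fun acc i => acc ++ [pvShiftA i count]) []
    if pvScanA swc inp (PySem.List.len sw) (PySem.List.pyRange 0 (PySem.List.len inp) 1) then
      some count
    else pvLoopA sw inp rest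

def get_shitf (sw_index : List Int) (inp_index : List Int) : Option Int :=
  pvLoopA sw_index inp_index (PySem.List.pyRange 0 26 1)

-- ===== PORT B =====
def pvShiftB (s c : Int) : Int := if 26 ≤ s + c then s + c - 26 else s + c

def pvCandsB (sw_index inp_index : List Int) (i : Int) : List Int :=
  if PySem.List.len sw_index = 0 then [0]
  else
    let d := PySem.List.pyGetD inp_index i 0 - PySem.List.pyGetD sw_index 0 0
    [d, d + 26].filter (fun c => decide (0 ≤ c) && decide (c < 26))

def pvVerifyB (sw_index inp_index : List Int) (i c : Int) : Bool :=
  (PySem.List.pyRange 0 (PySem.List.len sw_index) 1).all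
    (fun j => PySem.List.pyGetD inp_index (i + j) 0 == pvShiftB (PySem.List.pyGetD sw_index j 0) c)

def get_shitf_alt (sw_index : List Int) (inp_index : List Int) : Option Int :=
  let n := PySem.List.len sw_index
  let m := PySem.List.len inp_index
  let hits := (PySem.List.pyRange 0 (m - n + 1) 1).foldl
    (fun acc i =>
      (pvCandsB sw_index inp_index i).foldl
        (fun acc2 c => if pvVerifyB sw_index inp_index i c then acc2 ++ [c] else acc2) acc) []
  if hits.isEmpty then none else PySem.List.min? hits (fun x => x)

-- ===== PRECONDITION & SPEC =====
-- On the single input where both lists are empty A returns None (its position loop ranges over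
-- the empty text), while B returns 0: the empty pattern occurs in the empty text at shift 0,
-- so 0 is the intended answer.
def D_get_shitf (sw_index : List Int) (inp_index : List Int) : Prop := sw_index = [] ∧ inp_index = []
instance (sw_index : List Int) (inp_index : List Int) : Decidable (D_get_shitf sw_index inp_index) := by unfold D_get_shitf; infer_instance

def Spec_get_shitf (sw_index : List Int) (inp_index : List Int) (out : Option Int) : Prop := ¬ D_get_shitf sw_index inp_index → out = get_shitf_alt sw_index inp_index
instance (sw_index : List Int) (inp_index : List Int) (out : Option Int) : Decidable (Spec_get_shitf sw_index inp_index out) := by unfold Spec_get_shitf; infer_instance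

def pvDiffWitness_get_shitf : List Int × List Int := ([], [])
def pvDiffWitnessOut_get_shitf : (Option Int) × (Option Int) := (none, some 0)

-- ===== CLAIM (what is proved, stated in full; the proofs are below) =====
def Claim_unchanged_get_shitf : Prop := ∀ (sw_index : List Int) (inp_index : List Int), Dom_get_shitf sw_index inp_index → Spec_get_shitf sw_index inp_index (get_shitf sw_index inp_index)
def Claim_changed_get_shitf : Prop := Dom_get_shitf (pvDiffWitness_get_shitf.1) (pvDiffWitness_get_shitf.2) ∧ D_get_shitf (pvDiffWitness_get_shitf.1) (pvDiffWitness_get_shitf.2) ∧ get_shitf (pvDiffWitness_get_shitf.1) (pvDiffWitness_get_shitf.2) = pvDiffWitnessOut_get_shitf.1 ∧ get_shitf_alt (pvDiffWitness_get_shitf.1) (pvDiffWitness_get_shitf.2) = pvDiffWitnessOut_get_shitf.2 ∧ pvDiffWitnessOut_get_shitf.1 ≠ pvDiffWitnessOut_get_shitf.2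
def Claim_exact_get_shitf : Prop := ∀ (sw_index : List Int) (inp_index : List Int), Dom_get_shitf sw_index inp_index → D_get_shitf sw_index inp_index → get_shitf sw_index inp_index ≠ get_shitf_alt sw_index inp_index

-- ===== LEMMAS AND PROOFS =====

-- the hit list B's two nested append-loops build, in flatMap form
def pvHits (sw inp : List Int) : List Int :=
  (PySem.List.pyRange 0 ((inp.length : Int) - (sw.length : Int) + 1) 1).flatMap
    (fun i => (pvCandsB sw inp i).filter (fun c => pvVerifyB sw inp i c))

-- A's check at shift c, with the rebuilt shifted word written as a map
def pvScanAt (sw inp : List Int) (c : Int) : Bool :=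
  pvScanA (sw.map (fun s => pvShiftA s c)) inp (PySem.List.len sw) (PySem.List.pyRange 0 (PySem.List.len inp) 1)

lemma alt_eq_min (sw inp : List Int) :
    get_shitf_alt sw inp = PySem.List.min? (pvHits sw inp) (fun x => x) := by
  unfold get_shitf_alt pvHits
  simp only [PySem.List.len_eq]
  have hin : ∀ (acc : List Int) (i : Int),
      (pvCandsB sw inp i).foldl (fun acc2 c => if pvVerifyB sw inp i c then acc2 ++ [c] else acc2) acc
        = acc ++ (pvCandsB sw inp i).filter (fun c => pvVerifyB sw inp i c) := by
    intro acc i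
    exact PySem.List.foldl_append_if_eq_filter _ _ _
  simp only [hin]
  rw [PySem.List.foldl_append_eq_flatMap]
  simp only [List.nil_append]
  split_ifs with h
  · rw [List.isEmpty_iff] at h
    rw [h]
    exact ((PySem.List.min?_eq_none_iff _ _).mpr rfl).symm
  · rfl

lemma loopA_eq_find (sw inp : List Int) (r : List Int) :
    pvLoopA sw inp r = r.find? (fun c => pvScanAt sw inp c) := by
  induction r with
  | nil => rfl
  | cons a rest ih =>
    show pvLoopA sw inp (a :: rest) = _
    unfold pvLoopA
    rw [PySem.List.foldl_append_singleton_eq_map]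
    simp only [List.nil_append]
    cases h : pvScanAt sw inp a with
    | true =>
      have h' := h
      unfold pvScanAt at h'
      rw [if_pos h', List.find?_cons_of_pos h]
    | false =>
      have h' := h
      unfold pvScanAt at h'
      rw [if_neg (by rw [h']; exact Bool.false_ne_true),
        List.find?_cons_of_neg (by rw [h]; exact Bool.false_ne_true), ih]

lemma scanA_iff (swc inp : List Int) (e : Int) (r : List Int) :
    pvScanA swc inp e r = true ↔ ∃ i ∈ r, swc = PySem.List.slice inp (some (0 + i)) (some (e + i)) := by
  induction r with
  | nil => simp [pvScanA]
  | cons a rest ih =>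
    unfold pvScanA
    split_ifs with h
    · simp only [true_iff]
      exact ⟨a, List.mem_cons_self, h⟩
    · rw [ih]
      constructor
      · rintro ⟨i, hi, hh⟩
        exact ⟨i, List.mem_cons_of_mem _ hi, hh⟩
      · rintro ⟨i, hi, hh⟩
        rcases List.mem_cons.mp hi with rfl | hi'
        · exact absurd hh h
        · exact ⟨i, hi', hh⟩

lemma slice_drop_take (inp : List Int) (n k : Nat) :
    PySem.List.slice inp (some (0 + (k : Int))) (some ((n : Int) + (k : Int))) = (inp.drop k).take n := by
  have h1 : (0 + (k : Int)) = ((k : Nat) : Int) := by ring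
  have h2 : ((n : Int) + (k : Int)) = (((n + k : Nat)) : Int) := by push_cast; ring
  rw [h1, h2, PySem.List.slice_natCast]
  congr 1
  omega

lemma verify_iff (sw inp : List Int) (k : Nat) (c : Int) (hk : k + sw.length ≤ inp.length) :
    pvVerifyB sw inp (k : Int) c = true ↔ sw.map (fun s => pvShiftB s c) = (inp.drop k).take sw.length := by
  unfold pvVerifyB
  rw [List.all_eq_true]
  have hget : ∀ (j : Nat) (_hj : j < sw.length),
      ((PySem.List.pyGetD inp ((k : Int) + (j : Int)) 0 == pvShiftB (PySem.List.pyGetD sw (j : Int) 0) c) = true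
        ↔ inp[k + j]'(by omega) = pvShiftB (sw[j]'(by omega)) c) := by
    intro j hj
    have e1 : ((k : Int) + (j : Int)) = (((k + j : Nat)) : Int) := by push_cast; ring
    rw [beq_iff_eq, e1, PySem.List.pyGetD_natCast, PySem.List.pyGetD_natCast,
      List.getD_eq_getElem _ _ (by omega), List.getD_eq_getElem _ _ (by omega)]
  constructor
  · intro h
    apply List.ext_getElem
    · simp only [List.length_map, List.length_take, List.length_drop]
      omega
    · intro j hj1 hj2
      simp only [List.length_map] at hj1
      have hmem : ((j : Int)) ∈ PySem.List.pyRange 0 (PySem.List.len sw) 1 := by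
        rw [PySem.List.mem_pyRange_one, PySem.List.len_eq]
        constructor
        · exact Int.natCast_nonneg j
        · exact_mod_cast hj1
      have hx := (hget j hj1).mp (h _ hmem)
      simp only [List.getElem_map, List.getElem_take, List.getElem_drop]
      rw [hx]
  · intro heq j hjmem
    rw [PySem.List.mem_pyRange_one, PySem.List.len_eq] at hjmem
    obtain ⟨hj0, hjn⟩ := hjmem
    have hjlt : j.toNat < sw.length := by omega
    have hj : j = ((j.toNat : Nat) : Int) := by omega
    rw [hj, hget j.toNat hjlt]
    have := congrArg (fun l => l[j.toNat]?) heq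
    simp only [List.getElem?_map] at this
    have h1 : sw[j.toNat]? = some (sw[j.toNat]'hjlt) := List.getElem?_eq_getElem hjlt
    have h2 : ((inp.drop k).take sw.length)[j.toNat]? =
        some (inp[k + j.toNat]'(by omega)) := by
      have hlt : j.toNat < ((inp.drop k).take sw.length).length := by
        simp only [List.length_take, List.length_drop]; omega
      rw [List.getElem?_eq_getElem hlt]
      simp only [List.getElem_take, List.getElem_drop]
    rw [h1, h2] at this
    simp only [Option.map_some, Option.some.injEq] at this
    exact this.symm

lemma mem_hits_iff (sw inp : List Int) (c : Int) :
    c ∈ pvHits sw inp ↔ ∃ i, (0 ≤ i ∧ i < (inp.length : Int) - (sw.length : Int) + 1) ∧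
      c ∈ pvCandsB sw inp i ∧ pvVerifyB sw inp i c = true := by
  unfold pvHits
  simp only [List.mem_flatMap, List.mem_filter, PySem.List.mem_pyRange_one]

lemma cands_bound (sw inp : List Int) (i c : Int) (hn : sw.length ≠ 0)
    (hc : c ∈ pvCandsB sw inp i) : 0 ≤ c ∧ c < 26 := by
  unfold pvCandsB at hc
  rw [if_neg (by rw [PySem.List.len_eq]; exact_mod_cast hn)] at hc
  simp only [List.mem_filter, Bool.and_eq_true, decide_eq_true_eq] at hc
  exact hc.2

lemma cands_of_verify (sw inp : List Int) (k : Nat) (c : Int) (hn : sw.length ≠ 0)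
    (_hk : k < inp.length) (h0 : 0 ≤ c) (h26 : c < 26)
    (hv : pvVerifyB sw inp (k : Int) c = true) : c ∈ pvCandsB sw inp (k : Int) := by
  have hzero : ((0 : Int)) ∈ PySem.List.pyRange 0 (PySem.List.len sw) 1 := by
    rw [PySem.List.mem_pyRange_one, PySem.List.len_eq]
    constructor
    · exact le_refl 0
    · exact_mod_cast Nat.pos_of_ne_zero hn
  unfold pvVerifyB at hv
  rw [List.all_eq_true] at hv
  have h0v := hv _ hzero
  rw [beq_iff_eq] at h0v
  unfold pvCandsB
  rw [if_neg (by rw [PySem.List.len_eq]; exact_mod_cast hn)]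
  simp only [List.mem_filter, List.mem_cons, Bool.and_eq_true,
    decide_eq_true_eq]
  have hk0 : ((k : Int) + 0) = (k : Int) := by ring
  rw [hk0] at h0v
  refine ⟨?_, h0, h26⟩
  unfold pvShiftB at h0v
  split_ifs at h0v with hs
  · right; omega
  · left; omega

lemma bridge (sw inp : List Int) (hn : sw.length ≠ 0) (c : Int) :
    c ∈ pvHits sw inp ↔ (0 ≤ c ∧ c < 26 ∧ pvScanAt sw inp c = true) := by
  have hAB : (fun s => pvShiftA s c) = (fun s => pvShiftB s c) := by
    funext s
    unfold pvShiftA pvShiftB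
    split_ifs <;> omega
  constructor
  · intro hc
    obtain ⟨i, ⟨hi0, hilt⟩, hcand, hver⟩ := (mem_hits_iff sw inp c).mp hc
    obtain ⟨h0, h26⟩ := cands_bound sw inp i c hn hcand
    refine ⟨h0, h26, ?_⟩
    have hik : i = ((i.toNat : Nat) : Int) := by omega
    have hkn : i.toNat + sw.length ≤ inp.length := by omega
    rw [hik] at hver
    have hmatch := (verify_iff sw inp i.toNat c hkn).mp hver
    unfold pvScanAt
    rw [scanA_iff]
    refine ⟨((i.toNat : Nat) : Int), ?_, ?_⟩
    · rw [PySem.List.mem_pyRange_one, PySem.List.len_eq]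
      constructor
      · exact Int.natCast_nonneg _
      · have : i.toNat < inp.length := by omega
        exact_mod_cast this
    · rw [PySem.List.len_eq, slice_drop_take inp sw.length i.toNat, hAB]
      exact hmatch
  · rintro ⟨h0, h26, hscan⟩
    unfold pvScanAt at hscan
    obtain ⟨i, hmem, heq⟩ := (scanA_iff _ inp _ _).mp hscan
    rw [PySem.List.mem_pyRange_one, PySem.List.len_eq] at hmem
    obtain ⟨hi0, him⟩ := hmem
    have hik : i = ((i.toNat : Nat) : Int) := by omega
    rw [PySem.List.len_eq, hik, slice_drop_take inp sw.length i.toNat] at heq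
    have hkm : i.toNat < inp.length := by omega
    have hlen := congrArg List.length heq
    simp only [List.length_map, List.length_take, List.length_drop] at hlen
    have hkn : i.toNat + sw.length ≤ inp.length := by omega
    rw [hAB] at heq
    have hver := (verify_iff sw inp i.toNat c hkn).mpr heq
    have hcand := cands_of_verify sw inp i.toNat c hn hkm h0 h26 hver
    apply (mem_hits_iff sw inp c).mpr
    refine ⟨((i.toNat : Nat) : Int), ⟨Int.natCast_nonneg _, by omega⟩, hcand, hver⟩

lemma find_eq_min (p : Int → Bool) (hits : List Int)
    (hmem : ∀ c, c ∈ hits ↔ (0 ≤ c ∧ c < 26 ∧ p c = true)) :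
    (PySem.List.pyRange 0 26 1).find? p = PySem.List.min? hits (fun x => x) := by
  have hfirst : ∀ (mv : Int), 0 ≤ mv → mv < 26 → p mv = true →
      (∀ x, 0 ≤ x → x < mv → p x = false) →
      (PySem.List.pyRange 0 26 1).find? p = some mv := by
    intro mv hmv0 hmv26 hpmv hminimal
    have H : ∀ fuel : Nat, ∀ a : Int, ((26 : Int) - a).toNat = fuel → a ≤ mv →
        (∀ x, a ≤ x → x < mv → p x = false) →
        (PySem.List.pyRange a 26 1).find? p = some mv := by
      intro fuel
      induction fuel with
      | zero => intro a hfa ha _; omega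
      | succ f ih =>
        intro a hfa ha hmin
        have hab : a < 26 := by omega
        rw [PySem.List.pyRange_one_cons hab, List.find?_cons]
        by_cases hma : a = mv
        · subst hma
          rw [hpmv]
        · have hpa : p a = false := hmin a le_rfl (by omega)
          rw [hpa]
          exact ih (a + 1) (by omega) (by omega) (fun x hx1 hx2 => hmin x (by omega) hx2)
    exact H ((26 : Int) - 0).toNat 0 rfl hmv0 hminimal
  cases hmin : PySem.List.min? hits (fun x => x) with
  | none =>
    have hnil : hits = [] := (PySem.List.min?_eq_none_iff _ _).mp hmin
    subst hnil
    rw [List.find?_eq_none]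
    intro x hx hpx
    have hxb := PySem.List.mem_pyRange_one.mp hx
    exact absurd ((hmem x).mpr ⟨hxb.1, hxb.2, hpx⟩) (List.not_mem_nil)
  | some mv =>
    have hmv : mv ∈ hits := PySem.List.min?_mem hmin
    obtain ⟨h0, h26, hp⟩ := (hmem mv).mp hmv
    apply hfirst mv h0 h26 hp
    intro x hx0 hxmv
    cases hpx : p x with
    | false => rfl
    | true =>
      exfalso
      have hxh : x ∈ hits := (hmem x).mpr ⟨hx0, by omega, hpx⟩
      have := PySem.List.min?_isMin hmin x hxh
      simp only at this
      omega

-- ===== VERDICT (by name: the statement is the Claim_ definition above) =====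
theorem get_shitf_spec : Claim_unchanged_get_shitf := by
  intro sw inp _ hnd
  show get_shitf sw inp = get_shitf_alt sw inp
  rw [alt_eq_min]
  unfold get_shitf
  rw [loopA_eq_find]
  by_cases hn : sw.length = 0
  · have hsw : sw = [] := List.eq_nil_of_length_eq_zero hn
    subst hsw
    have hm : inp ≠ [] := fun h => hnd ⟨rfl, h⟩
    have hmpos : 0 < inp.length := List.length_pos_of_ne_nil hm
    have hcands : ∀ i : Int, pvCandsB [] inp i = [0] := by
      intro i
      unfold pvCandsB
      rw [if_pos (by rw [PySem.List.len_eq]; rfl)]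
    have hverify : ∀ i : Int, pvVerifyB [] inp i 0 = true := by
      intro i
      unfold pvVerifyB
      rw [PySem.List.len_eq]
      rw [show ((List.length ([] : List Int) : Int)) = 0 from rfl]
      rw [PySem.List.pyRange_one_eq_nil le_rfl]
      rfl
    have h0mem : (0 : Int) ∈ pvHits [] inp := by
      apply (mem_hits_iff [] inp 0).mpr
      refine ⟨0, ⟨le_refl 0, by simp⟩, ?_, hverify 0⟩
      rw [hcands 0]
      exact List.mem_singleton.mpr rfl
    have honly : ∀ x ∈ pvHits [] inp, x = 0 := by
      intro x hx
      obtain ⟨i, _, hc, _⟩ := (mem_hits_iff [] inp x).mp hx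
      rw [hcands i] at hc
      exact List.mem_singleton.mp hc
    have hscan : pvScanAt [] inp 0 = true := by
      unfold pvScanAt
      rw [scanA_iff]
      refine ⟨0, ?_, ?_⟩
      · rw [PySem.List.mem_pyRange_one, PySem.List.len_eq]
        exact ⟨le_refl 0, by exact_mod_cast hmpos⟩
      · rw [PySem.List.len_eq]
        have := slice_drop_take inp 0 0
        simp only [Nat.cast_zero, Int.add_zero, List.take_zero] at this ⊢
        rw [show ((List.length ([] : List Int) : Int)) = 0 from rfl]
        rw [this]
        rfl
    rw [PySem.List.pyRange_one_cons (by norm_num : (0 : Int) < 26), List.find?_cons, hscan]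
    cases hminv : PySem.List.min? (pvHits [] inp) (fun x => x) with
    | none =>
      exfalso
      have := (PySem.List.min?_eq_none_iff _ _).mp hminv
      rw [this] at h0mem
      exact List.not_mem_nil h0mem
    | some mv =>
      have := honly mv (PySem.List.min?_mem hminv)
      rw [this]
  · exact find_eq_min _ _ (bridge sw inp hn)

theorem get_shitf_changed : Claim_changed_get_shitf := by
  unfold Claim_changed_get_shitf; decide

theorem get_shitf_tight : Claim_exact_get_shitf := by
  intro sw inp _ hd
  obtain ⟨h1, h2⟩ := hd
  subst h1; subst h2; decide
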